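-- pv_equiv track=rewrite | github.com/paulklemstine/factor | v22_nested_ppt.py | bytes_to_ppt
-- ===== SOURCE A (Python) =====
-- def cf_to_sb_path(terms):
--     """CF -> Stern-Brocot L/R path."""
--     path = []
--     directions = ['R', 'L']
--     for i, a in enumerate(terms):
--         d = directions[i % 2]
--         path.extend([d] * a)
--     return terms[0] == 0, path
--
-- def sb_path_to_berggren(path):
--     """SB L/R path -> Berggren ternary address."""
--     addr = []
--     i = 0
--     while i < len(path):
--         if i + 1 < len(path):
--             bits = (0 if path[i] == 'L' else 1) * 2 + (0 if path[i+1] == 'L' else 1)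
--             addr.append(bits % 3)
--             if bits == 3:
--                 addr.append(1)
--             i += 2
--         else:
--             addr.append(0 if path[i] == 'L' else 1)
--             i += 1
--     return addr
--
-- B_MATS = [
--     [[1, -2, 2], [2, -1, 2], [2, -2, 3]],   # B1
--     [[1,  2, 2], [2,  1, 2], [2,  2, 3]],    # B2
--     [[-1, 2, 2], [-2, 1, 2], [-2, 2, 3]],    # B3
-- ]
--
-- def mat_vec(M, v):
--     """3x3 matrix * 3-vector, pure Python ints."""
--     return [sum(M[i][j] * v[j] for j in range(3)) for i in range(3)]
--
-- def codec_bitpack_encode(data):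
--     """Bitpack: each byte -> CF partial quotient (byte+1)."""
--     terms = [0]
--     for byte in data:
--         terms.append(byte + 1)
--     return terms
--
-- def bytes_to_ppt(data):
--     """Full pipeline: bytes -> CF -> SB path -> Berggren -> PPT(a,b,c).
--     Returns (a, b, c, berggren_addr) for analysis."""
--     if len(data) == 0:
--         return (3, 4, 5, [])
--     terms = codec_bitpack_encode(data)
--     has_zero, sb_path = cf_to_sb_path(terms)
--     berg_addr = sb_path_to_berggren(sb_path)
--     # Walk the Berggren tree
--     triple = [3, 4, 5]
--     for idx in berg_addr:
--         if 0 <= idx <= 2: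
--             triple = mat_vec(B_MATS[idx], triple)
--     return (triple[0], triple[1], triple[2], berg_addr)
-- ===== SOURCE B (Python) =====
-- def bytes_to_ppt(data):
--     """Full pipeline: bytes -> CF -> SB path -> Berggren -> PPT(a,b,c).
--     Run-length version: the Berggren address is emitted per byte-run in closed
--     form (repeated blocks) instead of pairing an explicit L/R character path,
--     and the tree walk updates (a,b,c) with explicit affine formulas."""
--     if len(data) == 0:
--         return (3, 4, 5, [])
--     addr = []
--     pending = None  # 0 = 'L', 1 = 'R'; a leftover path character not yet paired
--     for i, byte in enumerate(data):
--         count = byte + 1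
--         d = i % 2  # byte i contributes a run of count 'L' (i even) or 'R' (i odd)
--         if count <= 0:
--             continue
--         if pending is not None:
--             bits = pending * 2 + d
--             addr.append(bits % 3)
--             if bits == 3:
--                 addr.append(1)
--             pending = None
--             count -= 1
--         # a pair (d, d) encodes to [0] for 'LL' and [0, 1] for 'RR'
--         block = [0, 1] if d == 1 else [0]
--         addr.extend(block * (count // 2))
--         pending = d if count % 2 == 1 else None
--     if pending is not None:
--         addr.append(pending)
--     a, b, c = 3, 4, 5
--     for idx in addr:
--         if idx == 0:
--             a, b, c = a - 2*b + 2*c, 2*a - b + 2*c, 2*a - 2*b + 3*c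
--         elif idx == 1:
--             a, b, c = a + 2*b + 2*c, 2*a + b + 2*c, 2*a + 2*b + 3*c
--         else:
--             a, b, c = -a + 2*b + 2*c, -2*a + b + 2*c, -2*a + 2*b + 3*c
--     return (a, b, c, addr)
-- ===== Notes on version B (the rewrite author's own statement) =====
-- stated objective: alternative
-- what changed: B emits the Berggren address run-by-run in closed form (repeated blocks per byte, with a one-character pending carry) instead of materializing the full Stern-Brocot L/R character path and pairing it, and walks the tree with explicit affine updates of (a,b,c) instead of generic 3x3 matrix-vector products.
import Mathlib
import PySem

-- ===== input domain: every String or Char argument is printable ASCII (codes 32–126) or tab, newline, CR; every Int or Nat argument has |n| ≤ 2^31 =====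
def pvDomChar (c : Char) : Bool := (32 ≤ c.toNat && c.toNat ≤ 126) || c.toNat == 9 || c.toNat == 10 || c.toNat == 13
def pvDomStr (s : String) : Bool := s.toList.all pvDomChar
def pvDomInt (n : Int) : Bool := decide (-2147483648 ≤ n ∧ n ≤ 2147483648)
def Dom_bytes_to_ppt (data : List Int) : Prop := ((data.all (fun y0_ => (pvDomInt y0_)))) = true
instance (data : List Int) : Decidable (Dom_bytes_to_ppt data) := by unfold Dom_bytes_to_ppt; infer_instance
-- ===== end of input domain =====

-- B emits the Berggren address per byte-run in closed form (repeated blocks with a pending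
-- carry) instead of pairing an explicit L/R character path, and walks the tree with explicit
-- affine updates of (a,b,c) instead of generic 3x3 matrix-vector products (alternative).

-- ===== PORT A =====
def pvDirections : List Char := ['R', 'L']

-- cf_to_sb_path; terms[0] is in range at every call site (terms always starts with 0),
-- and Python's [d]*a for negative a is empty, exactly List.replicate a.toNat.
def pvCfToSbPath (terms : List Int) : Bool × List Char :=
  (PySem.List.pyGet? terms 0 == some 0,
   (PySem.List.enumerate terms 0).foldl
     (fun path ia =>
       path ++ List.replicate ia.2.toNat (PySem.List.pyGetD pvDirections (PySem.Int.mod ia.1 2) 'R'))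
     [])

-- sb_path_to_berggren: the while loop consumes the path two characters at a time
def pvSbToBerg : List Char → List Int
  | c1 :: c2 :: rest =>
    let bits : Int := (if c1 == 'L' then 0 else 1) * 2 + (if c2 == 'L' then 0 else 1)
    PySem.Int.mod bits 3 :: (if bits == 3 then (1 : Int) :: pvSbToBerg rest else pvSbToBerg rest)
  | [c] => [if c == 'L' then (0 : Int) else 1]
  | [] => []

def pvBMats : List (List (List Int)) :=
  [[[1, -2, 2], [2, -1, 2], [2, -2, 3]],
   [[1,  2, 2], [2,  1, 2], [2,  2, 3]],
   [[-1, 2, 2], [-2, 1, 2], [-2, 2, 3]]]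

-- mat_vec; all indices are in range (3x3 matrices, 3-vectors), getD is exact here
def pvMatVec (M : List (List Int)) (v : List Int) : List Int :=
  (List.range 3).map (fun i =>
    (List.range 3).foldl (fun s j => s + (M.getD i []).getD j 0 * v.getD j 0) 0)

def pvCodecEncode (data : List Int) : List Int :=
  data.foldl (fun ts b => ts ++ [b + 1]) [0]

def bytes_to_ppt (data : List Int) : Int × Int × Int × List Int :=
  if data.length = 0 then (3, 4, 5, [])
  else
    let terms := pvCodecEncode data
    let sb := (pvCfToSbPath terms).2
    let addr := pvSbToBerg sb
    let triple := addr.foldl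
      (fun t idx => if 0 ≤ idx ∧ idx ≤ 2 then pvMatVec (pvBMats.getD idx.toNat []) t else t)
      [3, 4, 5]
    (triple.getD 0 0, triple.getD 1 0, triple.getD 2 0, addr)

-- ===== PORT B =====
-- the per-byte run loop of Source B: i is the enumerate index, pending the unpaired character
def pvBergAux : List Int → Nat → Option Int → List Int
  | [], _, pending => match pending with | some p => [p] | none => []
  | byte :: rest, i, pending =>
    let count : Int := byte + 1
    let d : Int := ((i % 2 : Nat) : Int)
    if count ≤ 0 then pvBergAux rest (i + 1) pending
    else
      let emit1 : List Int × Int :=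
        match pending with
        | some p =>
          let bits := p * 2 + d
          (PySem.Int.mod bits 3 :: (if bits == 3 then [(1 : Int)] else []), count - 1)
        | none => ([], count)
      let block := if d == 1 then [(0 : Int), 1] else [0]
      let pending2 := if PySem.Int.mod emit1.2 2 == 1 then some d else none
      emit1.1 ++ (List.replicate (PySem.Int.floordiv emit1.2 2).toNat block).flatten
        ++ pvBergAux rest (i + 1) pending2

def pvStep (t : Int × Int × Int) (idx : Int) : Int × Int × Int :=
  let (a, b, c) := t
  if idx == 0 then (a - 2*b + 2*c, 2*a - b + 2*c, 2*a - 2*b + 3*c)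
  else if idx == 1 then (a + 2*b + 2*c, 2*a + b + 2*c, 2*a + 2*b + 3*c)
  else (-a + 2*b + 2*c, -2*a + b + 2*c, -2*a + 2*b + 3*c)

def bytes_to_ppt_alt (data : List Int) : Int × Int × Int × List Int :=
  if data.length = 0 then (3, 4, 5, [])
  else
    let addr := pvBergAux data 0 none
    let abc := addr.foldl pvStep (3, 4, 5)
    (abc.1, abc.2.1, abc.2.2, addr)

-- ===== PRECONDITION & SPEC =====
def Spec_bytes_to_ppt (data : List Int) (out : Int × Int × Int × List Int) : Prop := out = bytes_to_ppt_alt data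
instance (data : List Int) (out : Int × Int × Int × List Int) : Decidable (Spec_bytes_to_ppt data out) := by unfold Spec_bytes_to_ppt; infer_instance

-- ===== CLAIM (what is proved, stated in full; the proofs are below) =====
def Claim_equal_bytes_to_ppt : Prop := ∀ (data : List Int), Dom_bytes_to_ppt data → Spec_bytes_to_ppt data (bytes_to_ppt data)

-- ===== LEMMAS AND PROOFS =====

-- proof-only vocabulary: the character a direction code denotes, a pending carry as a path
-- prefix, and the L/R path contributed by the data bytes from enumerate-index s on
def pvChr (d : Int) : Char := if d = 1 then 'R' else 'L'

def pvPend : Option Int -> List Char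
  | none => []
  | some p => [pvChr p]

def pvPathOf : List Int -> Nat -> List Char
  | [], _ => []
  | b :: rest, s => List.replicate (b + 1).toNat (pvChr ((s % 2 : Nat) : Int)) ++ pvPathOf rest (s + 1)

theorem pvCodec_eq (data : List Int) :
    pvCodecEncode data = 0 :: data.map (fun b => b + 1) := by
  unfold pvCodecEncode
  rw [PySem.List.foldl_append_singleton_eq_map (f := fun b : Int => b + 1)]
  rfl

theorem pvDir_eq (s : Nat) :
    PySem.List.pyGetD pvDirections (PySem.Int.mod ((s : Int) + 1) 2) 'R'
      = pvChr ((s % 2 : Nat) : Int) := by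
  have h1 : ((s : Int) + 1) = (((s + 1 : Nat) : Int)) := by push_cast; ring
  rw [h1]
  rw [show PySem.Int.mod (((s + 1 : Nat) : Int)) 2 = (((s + 1) % 2 : Nat) : Int) from by
    exact_mod_cast PySem.Int.mod_natCast (s + 1) 2]
  rcases Nat.even_or_odd s with he | ho
  · have h : s % 2 = 0 := Nat.even_iff.mp he
    have h2 : (s + 1) % 2 = 1 := by omega
    rw [h, h2]; decide
  · have h : s % 2 = 1 := Nat.odd_iff.mp ho
    have h2 : (s + 1) % 2 = 0 := by omega
    rw [h, h2]; decide

theorem pvPathA_eq (data : List Int) : ∀ (s : Nat),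
    (PySem.List.enumerate (data.map (fun b => b + 1)) ((s : Int) + 1)).flatMap
      (fun ia => List.replicate ia.2.toNat
        (PySem.List.pyGetD pvDirections (PySem.Int.mod ia.1 2) 'R'))
      = pvPathOf data s := by
  induction data with
  | nil => intro s; simp [pvPathOf]
  | cons b rest ih =>
    intro s
    rw [List.map_cons, PySem.List.enumerate_cons]
    simp only [List.flatMap_cons]
    have h2 : ((s : Int) + 1 + 1) = (((s + 1 : Nat) : Int) + 1) := by push_cast; ring
    rw [pvDir_eq s, h2, ih (s + 1)]
    simp [pvPathOf]

-- A's full Stern-Brocot path is pvPathOf data 0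
theorem pvPath_eq (data : List Int) :
    (pvCfToSbPath (pvCodecEncode data)).2 = pvPathOf data 0 := by
  unfold pvCfToSbPath
  rw [pvCodec_eq, PySem.List.foldl_append_eq_flatMap, PySem.List.enumerate_cons]
  simp only [List.flatMap_cons, List.nil_append]
  have h0 : ((0 : Int) + 1) = (((0 : Nat) : Int) + 1) := by norm_num
  rw [h0, pvPathA_eq data 0]
  simp

-- a run of m equal characters pairs into ⌊m/2⌋ identical blocks plus a possible carry
theorem pvBerg_rep (d : Int) (hd : d = 0 ∨ d = 1) : ∀ (m : Nat) (rest : List Char),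
    pvSbToBerg (List.replicate m (pvChr d) ++ rest)
      = (List.replicate (m / 2) (if d = 1 then [(0 : Int), 1] else [0])).flatten
        ++ pvSbToBerg (pvPend (if m % 2 = 1 then some d else none) ++ rest) := by
  intro m
  induction m using Nat.twoStepInduction with
  | zero => intro rest; simp [pvPend]
  | one => intro rest; simp [pvPend, List.replicate_succ]
  | more m ih _ =>
    intro rest
    have hrep : List.replicate (m + 2) (pvChr d) ++ rest
        = pvChr d :: pvChr d :: (List.replicate m (pvChr d) ++ rest) := by
      simp [List.replicate_succ]
    rw [hrep]
    have hdiv : (m + 2) / 2 = m / 2 + 1 := by omega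
    have hmod : (m + 2) % 2 = m % 2 := by omega
    rcases hd with h | h <;> subst h <;>
      · have ih2 := ih rest
        simp [pvSbToBerg, pvChr, hdiv, hmod, List.replicate_succ, PySem.Int.mod] at ih2 ⊢
        first | exact ih2 | rw [ih2]

-- unfolding pvBergAux on a non-skipped byte (the run body, pending still to be matched)
theorem pvBergAux_cons_none (b : Int) (rest : List Int) (i : Nat) (hc : ¬ (b + 1 : Int) ≤ 0) :
    pvBergAux (b :: rest) i none
      = (List.replicate (PySem.Int.floordiv (b + 1) 2).toNat
          (if ((i % 2 : Nat) : Int) == 1 then [(0 : Int), 1] else [0])).flatten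
        ++ pvBergAux rest (i + 1)
            (if PySem.Int.mod (b + 1) 2 == 1 then some ((i % 2 : Nat) : Int) else none) := by
  simp only [pvBergAux, if_neg hc, List.nil_append]

theorem pvBergAux_cons_some (b : Int) (rest : List Int) (i : Nat) (q : Int)
    (hc : ¬ (b + 1 : Int) ≤ 0) :
    pvBergAux (b :: rest) i (some q)
      = PySem.Int.mod (q * 2 + ((i % 2 : Nat) : Int)) 3
          :: ((if q * 2 + ((i % 2 : Nat) : Int) == 3 then [(1 : Int)] else [])
        ++ ((List.replicate (PySem.Int.floordiv (b + 1 - 1) 2).toNat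
              (if ((i % 2 : Nat) : Int) == 1 then [(0 : Int), 1] else [0])).flatten
          ++ pvBergAux rest (i + 1)
              (if PySem.Int.mod (b + 1 - 1) 2 == 1 then some ((i % 2 : Nat) : Int) else none))) := by
  simp only [pvBergAux, if_neg hc, List.cons_append, List.append_assoc]

-- the run-body of pvBergAux equals A's pairing of a c-character run plus the rest
theorem pvBerg_run_eq (rest : List Int) (i : Nat) (d : Int) (hd : d = 0 ∨ d = 1)
    (c : Int) (hc : 0 ≤ c)
    (ih : ∀ (i : Nat) (p : Option Int), (p = none ∨ p = some 0 ∨ p = some 1) →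
      pvBergAux rest i p = pvSbToBerg (pvPend p ++ pvPathOf rest i)) :
    (List.replicate (PySem.Int.floordiv c 2).toNat (if d == 1 then [(0 : Int), 1] else [0])).flatten
      ++ pvBergAux rest i (if PySem.Int.mod c 2 == 1 then some d else none)
    = pvSbToBerg (List.replicate c.toNat (pvChr d) ++ pvPathOf rest i) := by
  have hck : c = ((c.toNat : Nat) : Int) := by omega
  rw [hck]
  set k := c.toNat with hk
  simp only [Int.toNat_natCast]
  have hdiv : (PySem.Int.floordiv (k : Int) 2).toNat = k / 2 := by
    rw [show PySem.Int.floordiv (k : Int) 2 = ((k / 2 : Nat) : Int) from by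
      exact_mod_cast PySem.Int.floordiv_natCast k 2]
    omega
  have hmod : PySem.Int.mod (k : Int) 2 = ((k % 2 : Nat) : Int) := by
    exact_mod_cast PySem.Int.mod_natCast k 2
  rw [hdiv, hmod, pvBerg_rep d hd k (pvPathOf rest i)]
  have hp2 : (if ((k % 2 : Nat) : Int) == 1 then some d else none)
      = (if k % 2 = 1 then some d else none) := by
    by_cases h : k % 2 = 1 <;> simp [h] <;> omega
  rw [hp2, ih i _ (by split <;> simp [hd])]
  congr 2
  rcases hd with h | h <;> simp [h]

-- one pair of path characters, as read by sb_path_to_berggren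
theorem pvSb_pair (q d : Int) (hq : q = 0 ∨ q = 1) (hd : d = 0 ∨ d = 1) (t : List Char) :
    pvSbToBerg (pvChr q :: pvChr d :: t)
      = PySem.Int.mod (q * 2 + d) 3
          :: ((if q * 2 + d == 3 then [(1 : Int)] else []) ++ pvSbToBerg t) := by
  rcases hq with h | h <;> rcases hd with h2 | h2 <;> subst h <;> subst h2 <;>
    (norm_num [pvSbToBerg, pvChr, PySem.Int.mod]; try decide)

-- the main invariant: B's run loop computes exactly A's pairing of the remaining path,
-- with the pending carry standing for one unread path character
theorem pvBerg_eq (data : List Int) : ∀ (i : Nat) (p : Option Int),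
    (p = none ∨ p = some 0 ∨ p = some 1) →
    pvBergAux data i p = pvSbToBerg (pvPend p ++ pvPathOf data i) := by
  induction data with
  | nil =>
    intro i p hp
    rcases hp with h | h | h <;> subst h <;> simp [pvBergAux, pvPathOf, pvPend, pvSbToBerg, pvChr]
  | cons b rest ih =>
    intro i p hp
    by_cases hc : (b + 1 : Int) ≤ 0
    · have ht : (b + 1).toNat = 0 := by omega
      rw [show pvBergAux (b :: rest) i p = pvBergAux rest (i + 1) p from by
        simp only [pvBergAux, if_pos hc], ih (i + 1) p hp]
      simp [pvPathOf, ht]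
    · have hd2 : ((i % 2 : Nat) : Int) = 0 ∨ ((i % 2 : Nat) : Int) = 1 := by omega
      have hpath : pvPathOf (b :: rest) i
          = List.replicate (b + 1).toNat (pvChr ((i % 2 : Nat) : Int)) ++ pvPathOf rest (i + 1) := by
        simp [pvPathOf]
      have hpos : (0 : Int) < b + 1 := by omega
      have hsplit : (b + 1).toNat = (b + 1 - 1).toNat + 1 := by omega
      rcases hp with h | h | h <;> subst h
      · -- pending = none : the whole run is paired directly
        rw [pvBergAux_cons_none b rest i hc, hpath]
        simp only [pvPend, List.nil_append]
        exact pvBerg_run_eq rest (i + 1) _ hd2 (b + 1) (by omega) ih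
      · -- pending = some 0 : the carried 'L' pairs with the first character of the run
        rcases hd2 with h | h
        · rw [pvBergAux_cons_some b rest i 0 hc, hpath, hsplit, List.replicate_succ, h]
          simp only [pvPend, List.cons_append, List.nil_append]
          rw [pvSb_pair 0 0 (Or.inl rfl) (Or.inl rfl)]
          rw [← pvBerg_run_eq rest (i + 1) 0 (Or.inl rfl) (b + 1 - 1) (by omega) ih]
        · rw [pvBergAux_cons_some b rest i 0 hc, hpath, hsplit, List.replicate_succ, h]
          simp only [pvPend, List.cons_append, List.nil_append]
          rw [pvSb_pair 0 1 (Or.inl rfl) (Or.inr rfl)]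
          rw [← pvBerg_run_eq rest (i + 1) 1 (Or.inr rfl) (b + 1 - 1) (by omega) ih]
      · -- pending = some 1 : the carried 'R' pairs with the first character of the run
        rcases hd2 with h | h
        · rw [pvBergAux_cons_some b rest i 1 hc, hpath, hsplit, List.replicate_succ, h]
          simp only [pvPend, List.cons_append, List.nil_append]
          rw [pvSb_pair 1 0 (Or.inr rfl) (Or.inl rfl)]
          rw [← pvBerg_run_eq rest (i + 1) 0 (Or.inl rfl) (b + 1 - 1) (by omega) ih]
        · rw [pvBergAux_cons_some b rest i 1 hc, hpath, hsplit, List.replicate_succ, h]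
          simp only [pvPend, List.cons_append, List.nil_append]
          rw [pvSb_pair 1 1 (Or.inr rfl) (Or.inr rfl)]
          rw [← pvBerg_run_eq rest (i + 1) 1 (Or.inr rfl) (b + 1 - 1) (by omega) ih]

-- elements of a Berggren address are 0, 1 or 2
theorem pvBerg_mem : ∀ (l : List Char), ∀ x ∈ pvSbToBerg l, x = 0 ∨ x = 1 ∨ x = 2
  | [] => by simp [pvSbToBerg]
  | [c] => by
    intro x hx
    simp only [pvSbToBerg, List.mem_singleton] at hx
    by_cases h : (c == 'L') = true <;> simp [h] at hx <;> subst hx <;> decide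
  | c1 :: c2 :: rest => by
    intro x hx
    have ih := pvBerg_mem rest
    by_cases h1 : (c1 == 'L') = true <;> by_cases h2 : (c2 == 'L') = true <;>
      simp [pvSbToBerg, h1, h2, PySem.Int.mod] at hx <;>
      · first
        | exact ih x hx
        | (rcases hx with rfl | hx
           · decide
           · first
             | exact ih x hx
             | (rcases hx with rfl | hx
                · decide
                · exact ih x hx))

-- one Berggren step: the generic matrix product equals B's affine update
theorem pvMatVec_step (idx a b c : Int) (h : idx = 0 ∨ idx = 1 ∨ idx = 2) :
    pvMatVec (pvBMats.getD idx.toNat []) [a, b, c]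
      = [(pvStep (a, b, c) idx).1, (pvStep (a, b, c) idx).2.1, (pvStep (a, b, c) idx).2.2] := by
  rcases h with h | h | h <;> subst h <;>
    simp [pvMatVec, pvBMats, pvStep, List.range_succ] <;> ring_nf <;> simp

theorem pvWalk_eq : ∀ (addr : List Int), (∀ x ∈ addr, x = 0 ∨ x = 1 ∨ x = 2) →
    ∀ (a b c : Int),
    addr.foldl (fun t idx => if 0 ≤ idx ∧ idx ≤ 2 then pvMatVec (pvBMats.getD idx.toNat []) t else t)
      [a, b, c]
    = [(addr.foldl pvStep (a, b, c)).1, (addr.foldl pvStep (a, b, c)).2.1,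
       (addr.foldl pvStep (a, b, c)).2.2] := by
  intro addr
  induction addr with
  | nil => intro _ a b c; simp
  | cons idx tl ih =>
    intro h a b c
    have hidx : idx = 0 ∨ idx = 1 ∨ idx = 2 := h idx (by simp)
    have hguard : 0 ≤ idx ∧ idx ≤ 2 := by rcases hidx with h | h | h <;> subst h <;> norm_num
    simp only [List.foldl_cons, if_pos hguard]
    rw [pvMatVec_step idx a b c hidx]
    rcases hps : pvStep (a, b, c) idx with ⟨a2, b2, c2⟩
    exact ih (fun x hx => h x (List.mem_cons_of_mem _ hx)) a2 b2 c2

-- ===== VERDICT (by name: the statement is the Claim_ definition above) =====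
theorem bytes_to_ppt_spec : Claim_equal_bytes_to_ppt := by
  intro data _
  unfold Spec_bytes_to_ppt bytes_to_ppt bytes_to_ppt_alt
  by_cases h : data.length = 0
  · simp [h]
  · simp only [h, if_false]
    have haddr : pvSbToBerg ((pvCfToSbPath (pvCodecEncode data)).2) = pvBergAux data 0 none := by
      rw [pvPath_eq]
      exact (pvBerg_eq data 0 none (Or.inl rfl)).symm
    rw [haddr]
    have hmem : ∀ x ∈ pvBergAux data 0 none, x = 0 ∨ x = 1 ∨ x = 2 := by
      intro x hx
      rw [pvBerg_eq data 0 none (Or.inl rfl)] at hx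
      exact pvBerg_mem _ x hx
    rw [pvWalk_eq (pvBergAux data 0 none) hmem 3 4 5]
    simp
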